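-- pv_equiv track=rewrite | github.com/Hernosepo/challenges-python | How_much_6kyu.py | howmuch
-- ===== SOURCE A (Python) =====
-- def howmuch(m, n):
--     infimus = min(m, n) #min
--     maximus = max(m, n) #max
--     lst = []
--     while (infimus <= maximus): #keep is going while
--         if ((infimus % 9 == 1) and (infimus %7 == 2)):
--             lst.append(["M: " + str(infimus), "B: " + str(infimus // 7), "C: " + str(infimus // 9)])
--         infimus += 1
--     return lst
-- ===== SOURCE B (Python) =====
-- def howmuch(m, n):
--     lo, hi = min(m, n), max(m, n)
--     # CRT: x % 9 == 1 and x % 7 == 2  <=>  x % 63 == 37; first such x >= lo, then stride 63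
--     start = lo + (37 - lo) % 63
--     return [["M: " + str(x), "B: " + str(x // 7), "C: " + str(x // 9)]
--             for x in range(start, hi + 1, 63)]
-- ===== Notes on version B (the rewrite author's own statement) =====
-- stated objective: faster
-- what changed: Replaces the element-by-element scan of [min,max] testing x%9==1 and x%7==2 with the CRT closed form x%63==37: compute the first solution >= min and step by 63.
import Mathlib
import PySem

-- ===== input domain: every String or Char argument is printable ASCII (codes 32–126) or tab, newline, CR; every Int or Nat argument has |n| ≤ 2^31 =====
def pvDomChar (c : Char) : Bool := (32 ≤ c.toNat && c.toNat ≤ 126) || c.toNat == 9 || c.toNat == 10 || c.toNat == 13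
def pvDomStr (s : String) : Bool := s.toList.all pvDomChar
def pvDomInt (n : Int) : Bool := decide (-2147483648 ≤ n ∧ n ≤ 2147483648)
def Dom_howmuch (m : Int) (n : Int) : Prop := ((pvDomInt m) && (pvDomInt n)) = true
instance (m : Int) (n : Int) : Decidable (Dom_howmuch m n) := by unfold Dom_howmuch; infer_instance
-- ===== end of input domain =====

-- B replaces A's element-by-element scan of [min,max] with the CRT closed form
-- (x%9==1 ∧ x%7==2 ⟺ x%63==37): first solution ≥ min, then stride 63 (faster, asymptotic).

-- ===== PORT A =====
-- A's while-loop: scan infimus..maximus one by one, appending matching rows.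
def howmuchLoopA (infimus : Int) (maximus : Int) (lst : List (List String)) :
    List (List String) :=
  if infimus ≤ maximus then
    howmuchLoopA (infimus + 1) maximus
      (if PySem.Int.mod infimus 9 == 1 && PySem.Int.mod infimus 7 == 2 then
        lst ++ [["M: " ++ PySem.Int.toStr infimus,
                 "B: " ++ PySem.Int.toStr (PySem.Int.floordiv infimus 7),
                 "C: " ++ PySem.Int.toStr (PySem.Int.floordiv infimus 9)]]
      else lst)
  else lst
termination_by (maximus + 1 - infimus).toNat
decreasing_by omega

def howmuch (m : Int) (n : Int) : List (List String) :=
  let infimus := min m n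
  let maximus := max m n
  howmuchLoopA infimus maximus []

-- ===== PORT B =====
def howmuch_alt (m : Int) (n : Int) : List (List String) :=
  let lo := min m n
  let hi := max m n
  let start := lo + PySem.Int.mod (37 - lo) 63
  (PySem.List.pyRange start (hi + 1) 63).map (fun x =>
    ["M: " ++ PySem.Int.toStr x,
     "B: " ++ PySem.Int.toStr (PySem.Int.floordiv x 7),
     "C: " ++ PySem.Int.toStr (PySem.Int.floordiv x 9)])

-- ===== PRECONDITION & SPEC =====
def Spec_howmuch (m : Int) (n : Int) (out : List (List String)) : Prop := out = howmuch_alt m n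
instance (m : Int) (n : Int) (out : List (List String)) : Decidable (Spec_howmuch m n out) := by unfold Spec_howmuch; infer_instance

-- ===== CLAIM (what is proved, stated in full; the proofs are below) =====
def Claim_equal_howmuch : Prop := ∀ (m : Int) (n : Int), Dom_howmuch m n → Spec_howmuch m n (howmuch m n)

-- ===== LEMMAS AND PROOFS =====

def pvRow (x : Int) : List String :=
  ["M: " ++ PySem.Int.toStr x,
   "B: " ++ PySem.Int.toStr (PySem.Int.floordiv x 7),
   "C: " ++ PySem.Int.toStr (PySem.Int.floordiv x 9)]

-- stride-63 range unfolds one element at a time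
theorem pyRange63_nil (a b : Int) (h : b ≤ a) : PySem.List.pyRange a b 63 = [] := by
  rw [PySem.List.pyRange_of_pos a b (by norm_num)]
  rw [if_neg (by omega)]
  simp

theorem pyRange63_cons (a b : Int) (h : a < b) :
    PySem.List.pyRange a b 63 = a :: PySem.List.pyRange (a + 63) b 63 := by
  rw [PySem.List.pyRange_of_pos a b (by norm_num),
      PySem.List.pyRange_of_pos (a + 63) b (by norm_num)]
  rw [if_pos h]
  by_cases h2 : a + 63 < b
  · rw [if_pos h2]
    have hn : ((b - a + 63 - 1) / 63).toNat = ((b - (a + 63) + 63 - 1) / 63).toNat + 1 := by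
      omega
    rw [hn, List.range_succ_eq_map, List.map_cons, List.map_map]
    refine List.cons_eq_cons.mpr ⟨by norm_num, ?_⟩
    apply List.map_congr_left
    intro k _
    simp only [Function.comp_apply, Nat.succ_eq_add_one]
    push_cast
    ring
  · rw [if_neg h2]
    have hn : ((b - a + 63 - 1) / 63).toNat = 1 := by omega
    rw [hn]
    simp

-- Python's % on a positive divisor is emod, so the two-congruence test is x % 63 = 37
theorem cond_iff (i : Int) :
    (PySem.Int.mod i 9 == 1 && PySem.Int.mod i 7 == 2) = true ↔ (37 - i) % 63 = 0 := by
  rw [PySem.Int.mod_eq_emod_of_pos (by norm_num : (0:Int) < 9),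
      PySem.Int.mod_eq_emod_of_pos (by norm_num : (0:Int) < 7)]
  simp only [Bool.and_eq_true, beq_iff_eq]
  omega

theorem loopA_eq (fuel : Nat) (i hi : Int) (hf : (hi + 1 - i).toNat ≤ fuel) (acc : List (List String)) :
    howmuchLoopA i hi acc =
      acc ++ (PySem.List.pyRange (i + PySem.Int.mod (37 - i) 63) (hi + 1) 63).map pvRow := by
  induction fuel generalizing i acc with
  | zero =>
    have hgt : hi < i := by omega
    rw [howmuchLoopA, if_neg (by omega)]
    rw [PySem.Int.mod_eq_emod_of_pos (by norm_num : (0:Int) < 63)]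
    rw [pyRange63_nil _ _ (by
      have := Int.emod_nonneg (37 - i) (by norm_num : (63:Int) ≠ 0)
      omega)]
    simp
  | succ f ih =>
    by_cases hle : i ≤ hi
    · rw [howmuchLoopA, if_pos hle]
      rw [ih (i + 1) (by omega)]
      rw [PySem.Int.mod_eq_emod_of_pos (by norm_num : (0:Int) < 63),
          PySem.Int.mod_eq_emod_of_pos (by norm_num : (0:Int) < 63)]
      have h0 : 0 ≤ (37 - i) % 63 := Int.emod_nonneg _ (by norm_num)
      have h63 : (37 - i) % 63 < 63 := Int.emod_lt_of_pos _ (by norm_num)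
      by_cases hc : (PySem.Int.mod i 9 == 1 && PySem.Int.mod i 7 == 2) = true
      · rw [if_pos hc]
        have hr0 : (37 - i) % 63 = 0 := (cond_iff i).mp hc
        have hr1 : (37 - (i + 1)) % 63 = 62 := by omega
        rw [hr0, hr1]
        have hcons : PySem.List.pyRange (i + 0) (hi + 1) 63 =
            i :: PySem.List.pyRange (i + 63) (hi + 1) 63 := by
          rw [show i + (0:Int) = i by ring]
          exact pyRange63_cons i (hi + 1) (by omega)
        rw [hcons]
        have : i + 1 + 62 = i + 63 := by ring
        rw [this]
        simp [pvRow]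
      · rw [if_neg hc]
        have hr0 : (37 - i) % 63 ≠ 0 := fun h => hc ((cond_iff i).mpr h)
        have hr1 : (37 - (i + 1)) % 63 = (37 - i) % 63 - 1 := by omega
        rw [hr1]
        have : i + 1 + ((37 - i) % 63 - 1) = i + (37 - i) % 63 := by ring
        rw [this]
    · rw [howmuchLoopA, if_neg hle]
      rw [PySem.Int.mod_eq_emod_of_pos (by norm_num : (0:Int) < 63)]
      rw [pyRange63_nil _ _ (by
        have := Int.emod_nonneg (37 - i) (by norm_num : (63:Int) ≠ 0)
        omega)]
      simp

-- ===== VERDICT (by name: the statement is the Claim_ definition above) =====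
theorem howmuch_spec : Claim_equal_howmuch := by
  intro m n _
  unfold Spec_howmuch howmuch howmuch_alt
  simp only []
  rw [loopA_eq (max m n + 1 - min m n).toNat (min m n) (max m n) (le_refl _) []]
  simp [pvRow]
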